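-- pv_equiv track=rewrite | github.com/dmi3ev1987/CodeWars | 6-kyu/fold-an-array/fold-an-array.py | fold_array
-- ===== SOURCE A (Python) =====
-- def fold_array(array, runs):
--     if runs == 0:
--         return array
--     result_array = []
--     length = len(array)
--     for index in range(length // 2):
--         result_array.append(array[index] + array[-(index + 1)])
--     if length % 2:
--         result_array.append(array[length // 2])
--     return fold_array(result_array, runs - 1)
-- ===== SOURCE B (Python) =====
-- def fold_array(array, runs):
--     result = array
--     for _ in range(runs):
--         n = len(result)
--         folded = [result[i] + result[n - 1 - i] for i in range(n // 2)]
--         if n % 2: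
--             folded.append(result[n // 2])
--         result = folded
--     return result
-- ===== Notes on version B (the rewrite author's own statement) =====
-- stated objective: simpler
-- what changed: Recursive per-run self-call with append-in-a-loop and negative indexing is replaced by an iterative loop over range(runs) building each folded list with a comprehension over non-negative indices.
import Mathlib
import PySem

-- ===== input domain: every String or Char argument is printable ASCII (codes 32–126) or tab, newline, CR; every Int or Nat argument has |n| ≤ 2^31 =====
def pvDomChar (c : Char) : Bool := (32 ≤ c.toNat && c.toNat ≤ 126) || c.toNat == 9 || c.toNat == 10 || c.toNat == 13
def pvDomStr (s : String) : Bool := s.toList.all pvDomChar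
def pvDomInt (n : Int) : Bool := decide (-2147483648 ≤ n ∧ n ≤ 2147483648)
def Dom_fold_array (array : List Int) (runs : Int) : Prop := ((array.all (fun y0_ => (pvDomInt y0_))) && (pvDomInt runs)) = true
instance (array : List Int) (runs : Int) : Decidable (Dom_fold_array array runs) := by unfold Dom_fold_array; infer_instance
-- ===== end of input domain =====

-- B iteratively folds the list runs times (comprehension, non-negative indices) instead of A's
-- recursion with append-loop and negative indexing; return values agree for runs ≥ 0.

-- ===== PORT A =====
-- one run of A's loop body: append array[index] + array[-(index+1)] for index in range(len//2), plus middle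
def foldStepA (array : List Int) : List Int :=
  let length := array.length
  let result_array := (List.range (length / 2)).foldl
    (fun acc index =>
      acc ++ [PySem.List.pyGetD array (index : Int) 0 +
              PySem.List.pyGetD array (-((index : Int) + 1)) 0]) []
  if length % 2 ≠ 0 then
    result_array ++ [PySem.List.pyGetD array ((length / 2 : Nat) : Int) 0]
  else result_array

-- A's recursion on `runs`; fuel = runs.toNat (exhausted only when runs < 0, where Python diverges)
def fold_array_go (array : List Int) (runs : Int) : Nat → List Int
  | 0 => array
  | fuel + 1 =>
    if runs = 0 then array
    else fold_array_go (foldStepA array) (runs - 1) fuel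

def fold_array (array : List Int) (runs : Int) : List Int :=
  fold_array_go array runs runs.toNat

-- ===== PORT B =====
-- one iteration of B's loop: comprehension over range(n//2) plus middle element
def foldStepB (result : List Int) : List Int :=
  let n := result.length
  let folded := (List.range (n / 2)).map
    (fun i => PySem.List.pyGetD result (i : Int) 0 +
              PySem.List.pyGetD result ((n : Int) - 1 - (i : Int)) 0)
  if n % 2 ≠ 0 then folded ++ [PySem.List.pyGetD result ((n / 2 : Nat) : Int) 0]
  else folded

def fold_array_alt (array : List Int) (runs : Int) : List Int :=
  (PySem.List.pyRange 0 runs 1).foldl (fun result _ => foldStepB result) array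

-- ===== PRECONDITION & SPEC =====
-- Pre_ excludes runs < 0, where Python A recurses forever (RecursionError); B returns there (see Raises_)
def Pre_fold_array (array : List Int) (runs : Int) : Prop := 0 ≤ runs
instance (array : List Int) (runs : Int) : Decidable (Pre_fold_array array runs) := by
  unfold Pre_fold_array; infer_instance

def pvWitness_fold_array : List Int × Int := ([1, 2, 3, 4, 5], 2)

def Spec_fold_array (array : List Int) (runs : Int) (out : List Int) : Prop := out = fold_array_alt array runs
instance (array : List Int) (runs : Int) (out : List Int) : Decidable (Spec_fold_array array runs out) := by unfold Spec_fold_array; infer_instance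

-- ===== CLAIM (what is proved, stated in full; the proofs are below) =====
def Claim_equal_fold_array : Prop := ∀ (array : List Int) (runs : Int), Dom_fold_array array runs → Pre_fold_array array runs → Spec_fold_array array runs (fold_array array runs)

-- ===== LEMMAS AND PROOFS =====

-- the two per-run bodies compute the same list
theorem stepA_eq_stepB (array : List Int) : foldStepA array = foldStepB array := by
  have hmap : (List.range (array.length / 2)).foldl
      (fun acc index =>
        acc ++ [PySem.List.pyGetD array (index : Int) 0 +
                PySem.List.pyGetD array (-((index : Int) + 1)) 0]) []
      = (List.range (array.length / 2)).map
        (fun i => PySem.List.pyGetD array (i : Int) 0 +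
                  PySem.List.pyGetD array ((array.length : Int) - 1 - (i : Int)) 0) := by
    rw [PySem.List.foldl_append_singleton_eq_map]
    simp only [List.nil_append]
    refine List.map_congr_left (fun i hi => ?_)
    have hex : ∃ a, a < array.length / 2 ∧ i = (a : Int) := by simpa using hi
    obtain ⟨a, ha, rfl⟩ := hex
    have h2 : -((a : Int) + 1) = -(((a + 1 : Nat)) : Int) := by push_cast; ring
    have h1 : a + 1 ≤ array.length := by omega
    rw [h2, PySem.List.pyGetD_neg_natCast array (a + 1) 0 (by omega) h1]
    have h3 : (0 : Int) ≤ (array.length : Int) - 1 - (a : Int) := by omega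
    have h4 : (array.length : Int) - 1 - (a : Int) < (array.length : Int) := by omega
    have hr := PySem.List.pyGetD_eq_getElem array (0 : Int) h3 h4
    rw [hr]
    congr 1
    congr 1
    omega
  simp only [foldStepA, foldStepB, hmap]

-- A's fueled recursion with runs = fuel is fuel-fold iteration of the step
theorem goA_eq_iterate : ∀ (fuel : Nat) (array : List Int),
    fold_array_go array (fuel : Int) fuel = foldStepA^[fuel] array := by
  intro fuel
  induction fuel with
  | zero => intro array; rfl
  | succ n ih =>
    intro array
    have hne : ((n + 1 : Nat) : Int) ≠ 0 := by positivity
    rw [fold_array_go, if_neg hne]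
    have h : ((n + 1 : Nat) : Int) - 1 = (n : Int) := by push_cast; ring
    rw [h, ih (foldStepA array), Function.iterate_succ_apply]

-- B's fold over range(runs) is runs.toNat-fold iteration of the step
theorem foldl_const_iterate (l : List Int) (a : List Int) :
    l.foldl (fun result _ => foldStepB result) a = foldStepB^[l.length] a := by
  induction l generalizing a with
  | nil => rfl
  | cons x xs ih => simp [List.foldl_cons, ih, Function.iterate_succ_apply]

-- ===== VERDICT (by name: the statement is the Claim_ definition above) =====
theorem fold_array_spec : Claim_equal_fold_array := by
  intro array runs _ hpre
  unfold Spec_fold_array fold_array fold_array_alt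
  rw [foldl_const_iterate, PySem.List.length_pyRange_one]
  have h0 : runs - 0 = runs := by ring
  rw [h0]
  have hs : foldStepA = foldStepB := funext stepA_eq_stepB
  have h : runs = ((runs.toNat : Nat) : Int) := (Int.toNat_of_nonneg hpre).symm
  rw [h, Int.toNat_natCast, goA_eq_iterate, hs]
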